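-- pv_equiv track=rewrite | github.com/peicd100/tts_tool | app__.py | _classify_lcids
-- ===== SOURCE A (Python) =====
-- from typing import Any, Dict, List, Optional, Tuple
--
-- def _classify_lcids(lcids: List[int]) -> str:
--     for lcid in lcids:
--         if (lcid & 0xFF) == 0x04:
--             return "zh"
--     for lcid in lcids:
--         if (lcid & 0xFF) == 0x09:
--             return "en"
--     return "other"
-- ===== SOURCE B (Python) =====
-- from typing import List
--
-- def _classify_lcids(lcids: List[int]) -> str:
--     found_en = False
--     for lcid in lcids:
--         low = lcid & 0xFF
--         if low == 0x04:
--             return "zh"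
--         if low == 0x09:
--             found_en = True
--     return "en" if found_en else "other"
-- ===== Notes on version B (the rewrite author's own statement) =====
-- stated objective: alternative
-- what changed: Single pass with a found_en flag replaces A's two sequential scans; zh still short-circuits and en is decided only after the full scan.
import Mathlib
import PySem

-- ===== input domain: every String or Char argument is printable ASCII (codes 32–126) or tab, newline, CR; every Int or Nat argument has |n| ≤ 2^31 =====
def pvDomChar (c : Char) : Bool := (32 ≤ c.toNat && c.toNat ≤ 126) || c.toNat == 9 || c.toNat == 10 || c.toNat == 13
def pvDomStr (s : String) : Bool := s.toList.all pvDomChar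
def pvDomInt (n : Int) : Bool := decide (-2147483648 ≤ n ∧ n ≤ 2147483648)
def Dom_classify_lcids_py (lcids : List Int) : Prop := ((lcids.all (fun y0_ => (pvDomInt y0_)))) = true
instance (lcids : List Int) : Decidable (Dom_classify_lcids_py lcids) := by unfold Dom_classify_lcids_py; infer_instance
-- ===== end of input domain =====

-- B replaces A's two sequential scans by a single pass keeping a found_en flag (alternative decomposition, same cost).

-- ===== PORT A =====
-- first loop of A: return "zh" on the first lcid whose low byte is 0x04
def pvALoop1 : List Int → Option String
  | [] => none
  | l :: ls => if (PySem.Int.band l 255) = 4 then some "zh" else pvALoop1 ls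

-- second loop of A: return "en" on the first lcid whose low byte is 0x09
def pvALoop2 : List Int → Option String
  | [] => none
  | l :: ls => if (PySem.Int.band l 255) = 9 then some "en" else pvALoop2 ls

def classify_lcids_py (lcids : List Int) : String :=
  match pvALoop1 lcids with
  | some s => s
  | none =>
    match pvALoop2 lcids with
    | some s => s
    | none => "other"

-- ===== PORT B =====
-- single loop of B, carrying the found_en flag
def pvBLoop : List Int → Bool → String
  | [], foundEn => if foundEn then "en" else "other"
  | l :: ls, foundEn =>
    if (PySem.Int.band l 255) = 4 then "zh"
    else pvBLoop ls (foundEn || ((PySem.Int.band l 255) = 9 : Bool))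

def classify_lcids_py_alt (lcids : List Int) : String := pvBLoop lcids false

-- ===== PRECONDITION & SPEC =====
def Spec_classify_lcids_py (lcids : List Int) (out : String) : Prop := out = classify_lcids_py_alt lcids
instance (lcids : List Int) (out : String) : Decidable (Spec_classify_lcids_py lcids out) := by unfold Spec_classify_lcids_py; infer_instance

-- ===== CLAIM (what is proved, stated in full; the proofs are below) =====
def Claim_equal_classify_lcids_py : Prop := ∀ (lcids : List Int), Dom_classify_lcids_py lcids → Spec_classify_lcids_py lcids (classify_lcids_py lcids)

-- ===== LEMMAS AND PROOFS =====

-- A's second loop only ever produces "en"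
theorem pvALoop2_some (ls : List Int) (s : String) (h : pvALoop2 ls = some s) : s = "en" := by
  induction ls with
  | nil => simp [pvALoop2] at h
  | cons l ls ih =>
    by_cases h9 : PySem.Int.band l 255 = 9
    · simp [pvALoop2, h9] at h; exact h.symm
    · rw [pvALoop2, if_neg h9] at h; exact ih h

-- B's loop computes A's composite result, for any incoming flag value
theorem pvBLoop_eq (ls : List Int) (foundEn : Bool) :
    pvBLoop ls foundEn =
      match pvALoop1 ls with
      | some s => s
      | none =>
        match pvALoop2 ls with
        | some s => s
        | none => if foundEn then "en" else "other" := by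
  induction ls generalizing foundEn with
  | nil => simp [pvBLoop, pvALoop1, pvALoop2]
  | cons l ls ih =>
    by_cases h4 : (PySem.Int.band l 255) = 4
    · simp [pvBLoop, pvALoop1, h4]
    · by_cases h9 : (PySem.Int.band l 255) = 9
      · simp [pvBLoop, pvALoop1, pvALoop2, h9, ih]
        cases hl1 : pvALoop1 ls with
        | some s => simp
        | none =>
          simp
          cases hl2 : pvALoop2 ls with
          | some s => simp [pvALoop2_some ls s hl2]
          | none => simp
      · simp [pvBLoop, pvALoop1, pvALoop2, h4, h9, ih]

-- ===== VERDICT (by name: the statement is the Claim_ definition above) =====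
theorem classify_lcids_py_spec : Claim_equal_classify_lcids_py := by
  intro lcids _
  unfold Spec_classify_lcids_py classify_lcids_py classify_lcids_py_alt
  rw [pvBLoop_eq]; rfl
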